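-- pv_equiv track=rewrite | github.com/piotrszyma/aoc2019 | day4/task2.py | meets_criteria
-- ===== SOURCE A (Python) =====
-- def meets_criteria(num):
--     num = str(num)
--     adjacent = False
--     for l, r in zip(num[:-1], num[1:]):
--         if int(l) > int(r):
--             return False
--         if l == r and not adjacent and num.count(l) == 2:
--             adjacent = True
--     return adjacent
-- ===== SOURCE B (Python) =====
-- def meets_criteria(num):
--     s = str(num)
--     if any(l > r for l, r in zip(s, s[1:])):
--         return False
--     return any(s.count(c) == 2 for c in set(s))
-- ===== Notes on version B (the rewrite author's own statement) =====
-- stated objective: alternative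
-- what changed: Replaces A's single flag-carrying pass (which checks order and hunts an adjacent exact double simultaneously) by two separate passes: a plain sortedness check over consecutive characters, then a frequency test '2 in counts' over the distinct digits, correct because sorted order makes equal digits contiguous.
import Mathlib
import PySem

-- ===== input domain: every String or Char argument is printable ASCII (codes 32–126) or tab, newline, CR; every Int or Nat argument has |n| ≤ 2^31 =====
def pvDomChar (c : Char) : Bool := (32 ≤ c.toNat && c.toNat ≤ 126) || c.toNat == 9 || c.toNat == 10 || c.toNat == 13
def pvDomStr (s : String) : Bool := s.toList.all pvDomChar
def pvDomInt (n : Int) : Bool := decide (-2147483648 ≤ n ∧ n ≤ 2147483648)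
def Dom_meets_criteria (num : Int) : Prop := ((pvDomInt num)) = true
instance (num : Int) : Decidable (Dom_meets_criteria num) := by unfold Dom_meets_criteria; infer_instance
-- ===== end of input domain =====

-- B splits A's single flag-carrying pass into a sortedness pass plus a frequency test over the distinct digits (alternative decomposition, similar cost).


-- ===== PORT A =====
-- for l, r in zip(num[:-1], num[1:]): with the early 'return False' and the 'adjacent' flag
def mcLoopA (s : String) : List (Char × Char) → Bool → Bool
  | [], adjacent => adjacent
  | (l, r) :: rest, adjacent =>
    match PySem.Int.ofStr? (String.ofList [l]), PySem.Int.ofStr? (String.ofList [r]) with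
    | some li, some ri =>
      if li > ri then false
      else if l == r && !adjacent && (PySem.Str.count s (String.ofList [l]) == 2) then
        mcLoopA s rest true
      else
        mcLoopA s rest adjacent
    | _, _ => false  -- int() ValueError; unreachable under Pre_ (num ≥ 0)

def meets_criteria (num : Int) : Bool :=
  let s := PySem.Int.toStr num
  mcLoopA s
    (List.zip (PySem.Str.slice s none (some (-1))).toList
              (PySem.Str.slice s (some 1) none).toList)
    false

-- ===== PORT B =====
def meets_criteria_alt (num : Int) : Bool :=
  let s := PySem.Int.toStr num
  -- if any(l > r for l, r in zip(s, s[1:])): return False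
  if (List.zip s.toList (PySem.Str.slice s (some 1) none).toList).any
       (fun p => decide (p.1 > p.2)) then false
  -- return any(s.count(c) == 2 for c in set(s))   (existence over a set: order-independent)
  else (PySem.Set.ofList s.toList).any (fun c => PySem.Str.count s (String.ofList [c]) == 2)

-- ===== PRECONDITION & SPEC =====
-- Pre_ excludes exactly the negative inputs: there str(num) starts with '-' and A raises ValueError at int('-').
def Pre_meets_criteria (num : Int) : Prop := 0 ≤ num
instance (num : Int) : Decidable (Pre_meets_criteria num) := by unfold Pre_meets_criteria; infer_instance
def pvWitness_meets_criteria : Int := (122)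

def Spec_meets_criteria (num : Int) (out : Bool) : Prop := out = meets_criteria_alt num
instance (num : Int) (out : Bool) : Decidable (Spec_meets_criteria num out) := by unfold Spec_meets_criteria; infer_instance

-- ===== CLAIM (what is proved, stated in full; the proofs are below) =====
def Claim_equal_meets_criteria : Prop := ∀ (num : Int), Dom_meets_criteria num → Pre_meets_criteria num → Spec_meets_criteria num (meets_criteria num)

-- ===== LEMMAS AND PROOFS =====

def mcDigits : List Char := ['0','1','2','3','4','5','6','7','8','9']

lemma mc_digitChar_mem (n : ℕ) : Nat.digitChar (n % 10) ∈ mcDigits := by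
  have h : n % 10 < 10 := Nat.mod_lt _ (by norm_num)
  interval_cases h' : n % 10 <;> decide

lemma mc_toDigitsCore_mem : ∀ (f n : ℕ) (l : List Char),
    (∀ c ∈ l, c ∈ mcDigits) → ∀ c ∈ Nat.toDigitsCore 10 f n l, c ∈ mcDigits := by
  intro f
  induction f with
  | zero => intro n l hl c hc; exact hl c hc
  | succ f ih =>
    intro n l hl c hc
    simp only [Nat.toDigitsCore] at hc
    split at hc
    · rcases List.mem_cons.mp hc with h | h
      · subst h; exact mc_digitChar_mem n
      · exact hl c h
    · refine ih (n / 10) _ ?_ c hc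
      intro d hd
      rcases List.mem_cons.mp hd with h | h
      · subst h; exact mc_digitChar_mem n
      · exact hl d h

lemma mc_toChars_digits (num : Int) (h : 0 ≤ num) :
    ∀ c ∈ (PySem.Int.toStr num).toList, c ∈ mcDigits := by
  rw [PySem.Int.toList_toStr]
  unfold PySem.Int.toChars
  rw [if_neg (by omega)]
  exact mc_toDigitsCore_mem _ _ [] (by simp)

lemma mc_ofStr_digit : ∀ c ∈ mcDigits,
    PySem.Int.ofStr? (String.ofList [c]) = some ((c.toNat : Int) - 48) := by
  intro c hc; fin_cases hc <;> decide

lemma mc_cmp_digit : ∀ l ∈ mcDigits, ∀ r ∈ mcDigits,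
    (((l.toNat : Int) - 48 > (r.toNat : Int) - 48) ↔ l > r) := by
  intro l hl r hr; fin_cases hl <;> fin_cases hr <;> decide

-- characterisation of A's loop on all-digit pairs
lemma mc_loopA_char (s : String) :
    ∀ (pairs : List (Char × Char)) (adj : Bool),
    (∀ p ∈ pairs, p.1 ∈ mcDigits ∧ p.2 ∈ mcDigits) →
    mcLoopA s pairs adj =
      if pairs.any (fun p => decide (p.1 > p.2)) then false
      else adj || pairs.any (fun p => p.1 == p.2 && (PySem.Str.count s (String.ofList [p.1]) == 2)) := by
  intro pairs
  induction pairs with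
  | nil => intro adj _; simp [mcLoopA]
  | cons p rest ih =>
    intro adj h
    obtain ⟨hl, hr⟩ := h p (List.mem_cons_self ..)
    have hrest : ∀ q ∈ rest, q.1 ∈ mcDigits ∧ q.2 ∈ mcDigits :=
      fun q hq => h q (List.mem_cons_of_mem _ hq)
    obtain ⟨l, r⟩ := p
    simp only [mcLoopA, mc_ofStr_digit l hl, mc_ofStr_digit r hr]
    by_cases hgt : l > r
    · rw [if_pos ((mc_cmp_digit l hl r hr).mpr hgt)]
      simp [hgt]
    · rw [if_neg (fun hc => hgt ((mc_cmp_digit l hl r hr).mp hc))]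
      have hdec : decide (l > r) = false := decide_eq_false hgt
      simp only [List.any_cons, hdec, Bool.false_or]
      by_cases hdb : l == r && !adj && (PySem.Str.count s (String.ofList [l]) == 2)
      · rw [if_pos hdb, ih true hrest]
        have heqP : (l == r && (PySem.Str.count s (String.ofList [l]) == 2)) = true := by
          simp only [Bool.and_assoc, Bool.and_eq_true] at hdb ⊢
          exact ⟨hdb.1, hdb.2.2⟩
        simp only [heqP, Bool.true_or, Bool.or_true]
      · rw [if_neg hdb, ih adj hrest]
        by_cases hadj : adj = true
        · simp only [hadj, Bool.true_or]
        · simp only [Bool.not_eq_true] at hadj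
          subst hadj
          have hP : (l == r && (PySem.Str.count s (String.ofList [l]) == 2)) = false := by
            revert hdb; cases hb : (l == r) <;> simp
          simp only [hP, Bool.false_or]

lemma mc_zip_dropLast (cs : List Char) :
    List.zip cs.dropLast (cs.drop 1) = List.zip cs (cs.drop 1) := by
  induction cs with
  | nil => rfl
  | cons a t ih =>
    cases t with
    | nil => rfl
    | cons b t' =>
      simp only [List.dropLast_cons₂, List.drop_one, List.tail_cons, List.zip_cons_cons] at *
      rw [ih]

-- a false sortedness test yields Pairwise (· ≤ ·)
lemma mc_noDec_pairwise : ∀ cs : List Char,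
    (List.zip cs (cs.drop 1)).any (fun p => decide (p.1 > p.2)) = false →
    cs.Pairwise (· ≤ ·) := by
  intro cs
  induction cs with
  | nil => intro _; exact List.Pairwise.nil
  | cons a t ih =>
    cases t with
    | nil => intro _; simp
    | cons b t' =>
      intro h
      simp only [List.drop_one, List.tail_cons, List.zip_cons_cons, List.any_cons,
        Bool.or_eq_false_iff, decide_eq_false_iff_not, not_lt] at h
      obtain ⟨hab, hrest⟩ := h
      have hprev : (List.zip (b :: t') ((b :: t').drop 1)).any (fun p => decide (p.1 > p.2)) = false := by
        simpa [List.drop_one] using hrest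
      have hp := ih hprev
      refine List.Pairwise.cons ?_ hp
      intro x hx
      rcases List.mem_cons.mp hx with h | h
      · subst h; exact hab
      · exact le_trans hab ((List.pairwise_cons.mp hp).1 x h)

-- a value of count 2 in a sorted list occurs at adjacent positions
lemma mc_adjacent_of_count : ∀ (cs : List Char) (c : Char),
    cs.Pairwise (· ≤ ·) → 2 ≤ cs.count c → (c, c) ∈ List.zip cs (cs.drop 1) := by
  intro cs
  induction cs with
  | nil => intro c _ hc; simp at hc
  | cons a t ih =>
    intro c hp hc
    by_cases hac : a = c
    · subst hac
      have hct : 1 ≤ t.count a := by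
        simp only [List.count_cons_self] at hc; omega
      have hmem : a ∈ t := List.count_pos_iff.mp (by omega)
      cases t with
      | nil => simp at hmem
      | cons b t' =>
        by_cases hba : b = a
        · subst hba; simp
        · exfalso
          have h1 : a ≤ b := (List.pairwise_cons.mp hp).1 b (List.mem_cons_self ..)
          have hmem' : a ∈ t' := by
            rcases List.mem_cons.mp hmem with h | h
            · exact absurd h.symm hba
            · exact h
          have h2 : b ≤ a :=
            (List.pairwise_cons.mp (List.pairwise_cons.mp hp).2).1 a hmem'
          exact hba (le_antisymm h2 h1)
    · have hc' : 2 ≤ t.count c := by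
        rw [List.count_cons_of_ne hac] at hc
        exact hc
      have hmem := ih c (List.pairwise_cons.mp hp).2 hc'
      cases t with
      | nil => simp at hc'
      | cons b t' =>
        simp only [List.drop_one, List.tail_cons, List.zip_cons_cons, List.mem_cons]
        right
        simpa using hmem

-- Str.count of a one-char needle is List.count
lemma mc_count_go_single (c : Char) : ∀ (l : List Char) (fuel acc : ℕ), l.length ≤ fuel →
    PySem.Chars.count.go [c] fuel l acc = acc + l.count c := by
  intro l
  induction l with
  | nil => intro fuel acc _; cases fuel <;> simp [PySem.Chars.count.go]
  | cons h t ih =>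
    intro fuel acc hlen
    cases fuel with
    | zero => simp at hlen
    | succ f =>
      have hlen' : t.length ≤ f := by simpa using hlen
      simp only [PySem.Chars.count.go, List.isPrefixOf, Bool.and_true]
      by_cases hch : c = h
      · subst hch
        rw [if_pos (by simp)]
        simp only [List.length_cons, List.drop_succ_cons, List.length_nil, List.drop_zero]
        rw [ih f (acc + 1) hlen', List.count_cons_self]
        omega
      · rw [if_neg (by simp [hch])]
        rw [ih f acc hlen', List.count_cons_of_ne (fun he : h = c => hch he.symm)]

lemma mc_count_single (s : String) (c : Char) :
    PySem.Str.count s (String.ofList [c]) = s.toList.count c := by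
  rw [PySem.Str.count_eq, String.toList_ofList]
  unfold PySem.Chars.count
  rw [if_neg (by simp)]
  rw [mc_count_go_single c s.toList s.toList.length 0 le_rfl, Nat.zero_add]

-- the two "exact double" tests agree on a sorted list
lemma mc_any_adj_eq (cs : List Char) (hp : cs.Pairwise (· ≤ ·)) :
    (List.zip cs (cs.drop 1)).any (fun p => p.1 == p.2 && (cs.count p.1 == 2)) =
    (PySem.Set.ofList cs).any (fun c => cs.count c == 2) := by
  rw [Bool.eq_iff_iff]
  simp only [List.any_eq_true, Bool.and_eq_true, beq_iff_eq]
  constructor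
  · rintro ⟨⟨l, r⟩, hmem, heq, hcnt⟩
    exact ⟨l, (PySem.Set.mem_ofList _ _).mpr (List.of_mem_zip hmem).1, hcnt⟩
  · rintro ⟨c, hc, hcnt⟩
    exact ⟨(c, c), mc_adjacent_of_count cs c hp (by omega), rfl, hcnt⟩

theorem mc_main (num : Int) (h : 0 ≤ num) : meets_criteria num = meets_criteria_alt num := by
  unfold meets_criteria meets_criteria_alt
  simp only []
  set s := PySem.Int.toStr num with hs
  have hdig := mc_toChars_digits num h
  have hslice1 : (PySem.Str.slice s (some 1) none).toList = s.toList.drop 1 := by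
    rw [PySem.Str.toList_slice]
    simpa using PySem.List.slice_from_one (xs := s.toList)
  have hslice0 : (PySem.Str.slice s none (some (-1))).toList = s.toList.dropLast := by
    exact PySem.Str.slice_to_neg_one s
  rw [hslice0, hslice1, mc_zip_dropLast]
  rw [mc_loopA_char s _ false ?hd]
  case hd =>
    intro p hp
    obtain ⟨h1, h2⟩ := List.of_mem_zip hp
    exact ⟨hdig _ h1, hdig _ (List.mem_of_mem_drop h2)⟩
  by_cases hdec : (List.zip s.toList (s.toList.drop 1)).any (fun p => decide (p.1 > p.2))
  · rw [if_pos hdec, if_pos hdec]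
  · rw [if_neg hdec, if_neg hdec, Bool.false_or]
    have hpw := mc_noDec_pairwise s.toList (by simpa using hdec)
    have h2 := mc_any_adj_eq s.toList hpw
    simp only [mc_count_single]
    exact h2

-- ===== VERDICT (by name: the statement is the Claim_ definition above) =====
theorem meets_criteria_spec : Claim_equal_meets_criteria := by
  intro num _ hpre
  unfold Spec_meets_criteria
  exact mc_main num hpre
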